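-- pv_equiv track=rewrite | github.com/andreykirov84/labsystem | utils/helpers.py | generate_numerated_tuple_choices_from_list
-- ===== SOURCE A (Python) =====
-- def generate_numerated_tuple_choices_from_list(ll):
--     result = []
--     max_choice_len = 0
--     for x in range(1, len(ll) + 1):
--         element = (x, ll[x - 1])
--         if len(ll[x - 1]) > max_choice_len:
--             max_choice_len = len(ll[x - 1])
--         result.append(element)
--     return tuple(result), max_choice_len
-- ===== SOURCE B (Python) =====
-- def generate_numerated_tuple_choices_from_list(ll):
--     # Divide and conquer: numerate slice ll[lo:hi] with indices starting at start,
--     # returning (tuple of pairs, max element length in the slice).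
--     def go(lo, hi, start):
--         if hi - lo == 0:
--             return (), 0
--         if hi - lo == 1:
--             return ((start, ll[lo]),), len(ll[lo])
--         mid = (lo + hi) // 2
--         lp, lm = go(lo, mid, start)
--         rp, rm = go(mid, hi, start + (mid - lo))
--         return lp + rp, max(lm, rm)
--     return go(0, len(ll), 1)
-- ===== Notes on version B (the rewrite author's own statement) =====
-- stated objective: alternative
-- what changed: Replaces A's single left-to-right index loop (append plus running-max branch) with a recursive divide-and-conquer over index ranges: the range is split at the midpoint, each half is numerated independently, and the two results are combined by concatenation and a binary max.
import Mathlib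
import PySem

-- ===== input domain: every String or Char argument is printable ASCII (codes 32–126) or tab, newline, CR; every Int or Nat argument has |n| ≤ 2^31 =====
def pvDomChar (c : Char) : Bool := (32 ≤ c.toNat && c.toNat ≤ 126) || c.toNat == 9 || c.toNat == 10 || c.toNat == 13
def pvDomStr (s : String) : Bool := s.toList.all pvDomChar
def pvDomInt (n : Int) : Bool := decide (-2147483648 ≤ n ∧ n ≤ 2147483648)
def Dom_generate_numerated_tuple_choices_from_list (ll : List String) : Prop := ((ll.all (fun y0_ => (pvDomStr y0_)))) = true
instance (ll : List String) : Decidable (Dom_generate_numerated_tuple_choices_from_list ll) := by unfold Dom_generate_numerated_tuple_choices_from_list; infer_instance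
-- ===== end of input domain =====

-- B replaces A's fused index loop by a recursive divide-and-conquer over index ranges; objective: alternative.

-- ===== PORT A =====
-- literal port of A: loop x over range(1, len(ll)+1), appending (x, ll[x-1]) and
-- maintaining a running max of len(ll[x-1]) via a branch.
-- ll[x-1] is always in range here, so pyGetD's default "" is never used.
def generate_numerated_tuple_choices_from_list (ll : List String) : (List (Int × String)) × Int :=
  (PySem.List.pyRange 1 ((ll.length : Int) + 1) 1).foldl
    (fun (st : List (Int × String) × Int) x =>
      let element := (x, PySem.List.pyGetD ll (x - 1) "")
      let m := if PySem.Str.len (PySem.List.pyGetD ll (x - 1) "") > st.2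
               then PySem.Str.len (PySem.List.pyGetD ll (x - 1) "") else st.2
      (st.1 ++ [element], m))
    ([], 0)

-- ===== PORT B =====
-- literal port of B's recursive helper go(lo, hi, start): lo and hi are nonnegative
-- on every call the program makes (they index slices of ll), so they are ported as Nat;
-- (lo + hi) // 2 on nonnegative ints is Nat division. ll[lo] is in range on every call,
-- so pyGetD's default "" is never used.
def pvGoB (ll : List String) (lo hi : Nat) (start : Int) : (List (Int × String)) × Int :=
  if hi - lo = 0 then ([], 0)
  else if hi - lo = 1 then
    ([(start, PySem.List.pyGetD ll (lo : Int) "")],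
     PySem.Str.len (PySem.List.pyGetD ll (lo : Int) ""))
  else
    let mid := (lo + hi) / 2
    let l := pvGoB ll lo mid start
    let r := pvGoB ll mid hi (start + ((mid : Int) - (lo : Int)))
    (l.1 ++ r.1, max l.2 r.2)
termination_by hi - lo
decreasing_by all_goals omega

def generate_numerated_tuple_choices_from_list_alt (ll : List String) : (List (Int × String)) × Int :=
  pvGoB ll 0 ll.length 1

-- ===== PRECONDITION & SPEC =====
def Spec_generate_numerated_tuple_choices_from_list (ll : List String) (out : (List (Int × String)) × Int) : Prop := out = generate_numerated_tuple_choices_from_list_alt ll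
instance (ll : List String) (out : (List (Int × String)) × Int) : Decidable (Spec_generate_numerated_tuple_choices_from_list ll out) := by unfold Spec_generate_numerated_tuple_choices_from_list; infer_instance

-- ===== CLAIM (what is proved, stated in full; the proofs are below) =====
def Claim_equal_generate_numerated_tuple_choices_from_list : Prop := ∀ (ll : List String), Dom_generate_numerated_tuple_choices_from_list ll → Spec_generate_numerated_tuple_choices_from_list ll (generate_numerated_tuple_choices_from_list ll)

-- ===== LEMMAS AND PROOFS =====

-- A's fold computes enumerate plus a running max of the lengths.
theorem portA_eq (ll : List String) :
    generate_numerated_tuple_choices_from_list ll =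
      (PySem.List.enumerate ll 1, (ll.map PySem.Str.len).foldl max 0) := by
  induction ll using List.reverseRecOn with
  | nil => decide
  | append_singleton ys y ih =>
    unfold generate_numerated_tuple_choices_from_list at *
    have hlen : ((ys ++ [y]).length : Int) + 1 = ((ys.length : Int) + 1) + 1 := by
      simp
    rw [hlen, PySem.List.pyRange_one_succ_right (by omega), List.foldl_append]
    have hcongr :
        (PySem.List.pyRange 1 ((ys.length : Int) + 1) 1).foldl
          (fun (st : List (Int × String) × Int) x =>
            let element := (x, PySem.List.pyGetD (ys ++ [y]) (x - 1) "")
            let m := if PySem.Str.len (PySem.List.pyGetD (ys ++ [y]) (x - 1) "") > st.2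
                     then PySem.Str.len (PySem.List.pyGetD (ys ++ [y]) (x - 1) "") else st.2
            (st.1 ++ [element], m)) ([], 0)
        = (PySem.List.pyRange 1 ((ys.length : Int) + 1) 1).foldl
          (fun (st : List (Int × String) × Int) x =>
            let element := (x, PySem.List.pyGetD ys (x - 1) "")
            let m := if PySem.Str.len (PySem.List.pyGetD ys (x - 1) "") > st.2
                     then PySem.Str.len (PySem.List.pyGetD ys (x - 1) "") else st.2
            (st.1 ++ [element], m)) ([], 0) := by
      apply PySem.List.foldl_congr_mem
      intro acc x hx
      rw [PySem.List.mem_pyRange_one] at hx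
      have h1 : PySem.List.pyGetD (ys ++ [y]) (x - 1) "" = PySem.List.pyGetD ys (x - 1) "" := by
        rw [PySem.List.pyGetD_eq_getElem (ys ++ [y]) "" (by omega) (by push_cast [List.length_append]; omega),
            PySem.List.pyGetD_eq_getElem ys "" (by omega) (by omega),
            List.getElem_append_left (by omega)]
      rw [h1]
    rw [hcongr, ih]
    have hy : PySem.List.pyGetD (ys ++ [y]) ((ys.length : Int) + 1 - 1) "" = y := by
      rw [PySem.List.pyGetD_eq_getElem (ys ++ [y]) "" (by omega) (by simp)]
      simp
    simp only [List.foldl_cons, List.foldl_nil, hy, Prod.mk.injEq]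
    constructor
    · rw [PySem.List.enumerate_append]
      simp [PySem.List.enumerate, add_comm]
    · rw [List.map_append, List.foldl_append]
      simp only [List.map, List.foldl]
      omega

theorem le_foldl_max' (l : List Int) (a : Int) : a ≤ l.foldl max a := by
  induction l generalizing a with
  | nil => simp
  | cons x t ih => exact le_trans (le_max_left a x) (ih (max a x))

theorem foldl_max_append (xs ys : List Int) (hx : 0 ≤ xs.foldl max 0) :
    (xs ++ ys).foldl max 0 = max (xs.foldl max 0) (ys.foldl max 0) := by
  rw [List.foldl_append]
  have h : List.foldl max (xs.foldl max 0) ys = List.foldl max (max (xs.foldl max 0) 0) ys := by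
    rw [max_eq_left hx]
  rw [h, List.foldl_assoc]

-- pvGoB on a well-formed range computes enumerate + running max over the slice ll[lo:hi].
theorem pvGoB_eq (ll : List String) (n lo hi : Nat) (start : Int)
    (hn : hi - lo = n) (hle : lo ≤ hi) (hhi : hi ≤ ll.length) :
    pvGoB ll lo hi start =
      (PySem.List.enumerate ((ll.drop lo).take (hi - lo)) start,
       (((ll.drop lo).take (hi - lo)).map PySem.Str.len).foldl max 0) := by
  induction n using Nat.strong_induction_on generalizing lo hi start with
  | _ n ih =>
    unfold pvGoB
    by_cases h0 : hi - lo = 0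
    · simp [h0]  -- empty range: both sides are ([], 0)
    · by_cases h1 : hi - lo = 1
      · have hlo : lo < ll.length := by omega
        have hslice : (ll.drop lo).take (hi - lo) = [ll[lo]] := by
          rw [h1, List.drop_eq_getElem_cons hlo, List.take_succ_cons, List.take_zero]
        have hget : PySem.List.pyGetD ll (lo : Int) "" = ll[lo] := by
          rw [PySem.List.pyGetD_eq_getElem ll "" (by omega) (by omega)]
          simp
        rw [if_neg h0, if_pos h1, hslice, hget]
        simp [PySem.List.enumerate_cons, PySem.List.enumerate_nil]
      · rw [if_neg h0, if_neg h1]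
        dsimp only
        rw [ih ((lo + hi) / 2 - lo) (by omega) lo ((lo + hi) / 2) start rfl (by omega) (by omega),
            ih (hi - (lo + hi) / 2) (by omega) ((lo + hi) / 2) hi _ rfl (by omega) hhi]
        have hdd : List.drop ((lo + hi) / 2 - lo) (List.drop lo ll) = List.drop ((lo + hi) / 2) ll := by
          rw [List.drop_drop]
          congr 1
          omega
        have hsplit : (ll.drop lo).take (hi - lo)
            = (ll.drop lo).take ((lo + hi) / 2 - lo) ++ (ll.drop ((lo + hi) / 2)).take (hi - (lo + hi) / 2) := by
          have h2 : hi - lo = ((lo + hi) / 2 - lo) + (hi - (lo + hi) / 2) := by omega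
          rw [h2, List.take_add, hdd]
        have hlenL : ((ll.drop lo).take ((lo + hi) / 2 - lo)).length = (lo + hi) / 2 - lo := by
          simp [List.length_take, List.length_drop]
          omega
        rw [hsplit, PySem.List.enumerate_append, hlenL, List.map_append,
            foldl_max_append _ _ (le_foldl_max' _ 0)]
        congr 2
        rw [Int.natCast_sub (by omega : lo ≤ (lo + hi) / 2)]

-- ===== VERDICT (by name: the statement is the Claim_ definition above) =====
theorem generate_numerated_tuple_choices_from_list_spec : Claim_equal_generate_numerated_tuple_choices_from_list := by
  intro ll _
  unfold Spec_generate_numerated_tuple_choices_from_list generate_numerated_tuple_choices_from_list_alt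
  rw [portA_eq, pvGoB_eq ll ll.length 0 ll.length 1 (by omega) (by omega) (by omega)]
  simp
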